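-- pv_equiv track=rewrite | github.com/abanoub-ashraf/substack-mcp-plus | src/handlers/strategy_handler.py | content_gap_analysis
-- ===== SOURCE A (Python) =====
-- from typing import Any, Dict, List
--
-- def content_gap_analysis(
--     my_post_analysis: Dict[str, Any], research_results: Dict[str, Any]
-- ) -> Dict[str, Any]:
--     my_themes = {item["theme"] for item in my_post_analysis.get("themes", [])}
--     market_themes = {item["theme"] for item in research_results.get("themes", [])}
--
--     gaps = sorted(list(market_themes - my_themes))[:8]
--     overlaps = sorted(list(my_themes & market_themes))[:8]
--
--     return {
--         "market_only_themes": gaps,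
--         "shared_themes": overlaps,
--         "opportunities": [
--             f"You have not covered much around '{theme}' yet, but it appears repeatedly in Substack research."
--             for theme in gaps[:5]
--         ],
--     }
-- ===== SOURCE B (Python) =====
-- def content_gap_analysis(my_post_analysis, research_results):
--     # Sort-and-merge: sort the raw theme lists (duplicates and all), then a single
--     # linear two-pointer merge classifies each distinct market theme as gap or overlap.
--     mine = sorted(item["theme"] for item in my_post_analysis.get("themes", []))
--     market = sorted(item["theme"] for item in research_results.get("themes", []))
--     gaps, overlaps = [], []
--     i, j, n, m = 0, 0, len(mine), len(market)
--     while j < m: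
--         t = market[j]
--         while i < n and mine[i] < t:
--             i += 1
--         if i < n and mine[i] == t:
--             overlaps.append(t)
--         else:
--             gaps.append(t)
--         j += 1
--         while j < m and market[j] == t:
--             j += 1
--     gaps = gaps[:8]
--     overlaps = overlaps[:8]
--     return {
--         "market_only_themes": gaps,
--         "shared_themes": overlaps,
--         "opportunities": [
--             f"You have not covered much around '{theme}' yet, but it appears repeatedly in Substack research."
--             for theme in gaps[:5]
--         ],
--     }
-- ===== Notes on version B (the rewrite author's own statement) =====
-- stated objective: alternative
-- what changed: A builds two hash sets and computes set difference and intersection, each sorted separately; B instead sorts the two raw theme lists (duplicates kept) and classifies every distinct market theme as gap or overlap with a single linear two-pointer merge, using no sets at all.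
import Mathlib
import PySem

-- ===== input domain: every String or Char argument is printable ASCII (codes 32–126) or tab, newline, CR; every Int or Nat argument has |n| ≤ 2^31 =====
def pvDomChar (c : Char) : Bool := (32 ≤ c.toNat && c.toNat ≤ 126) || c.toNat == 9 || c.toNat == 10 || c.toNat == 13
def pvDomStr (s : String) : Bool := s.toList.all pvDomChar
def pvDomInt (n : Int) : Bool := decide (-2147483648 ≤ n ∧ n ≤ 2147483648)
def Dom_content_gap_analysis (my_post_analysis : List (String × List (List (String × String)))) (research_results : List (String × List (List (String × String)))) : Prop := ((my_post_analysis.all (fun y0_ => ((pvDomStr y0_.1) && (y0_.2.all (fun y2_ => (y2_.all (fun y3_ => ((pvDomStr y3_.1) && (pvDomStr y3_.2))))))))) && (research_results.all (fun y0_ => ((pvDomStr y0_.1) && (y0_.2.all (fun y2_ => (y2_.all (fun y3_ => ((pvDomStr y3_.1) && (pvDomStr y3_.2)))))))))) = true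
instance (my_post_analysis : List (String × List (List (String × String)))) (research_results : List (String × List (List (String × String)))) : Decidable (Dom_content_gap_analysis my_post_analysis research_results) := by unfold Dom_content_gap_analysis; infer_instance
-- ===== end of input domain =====

-- B replaces A's hash-set algebra (set difference and intersection, each sorted separately)
-- by a sort-and-merge: sort the raw theme lists and classify each distinct market theme
-- with one linear two-pointer merge.

-- shared helpers (identical subexpressions of both Pythons):
-- item["theme"] — total form via getD ""; exact under Pre_ (key present)
def pvTheme (item : List (String × String)) : String :=
  ((PySem.Dict.mk item).get? "theme").getD ""
-- the f-string
def pvMsg (theme : String) : String :=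
  "You have not covered much around '" ++ theme ++ "' yet, but it appears repeatedly in Substack research."

-- ===== PORT A =====
def content_gap_analysis (my_post_analysis : List (String × List (List (String × String)))) (research_results : List (String × List (List (String × String)))) : List (String × List String) :=
  let my_themes : PySem.Set String :=
    PySem.Set.ofList (((PySem.Dict.mk my_post_analysis).getD "themes" []).map pvTheme)
  let market_themes : PySem.Set String :=
    PySem.Set.ofList (((PySem.Dict.mk research_results).getD "themes" []).map pvTheme)
  let gaps := PySem.List.slice (PySem.List.sorted (PySem.Set.diff market_themes my_themes) (fun x => x) false) none (some 8)
  let overlaps := PySem.List.slice (PySem.List.sorted (PySem.Set.inter my_themes market_themes) (fun x => x) false) none (some 8)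
  [("market_only_themes", gaps),
   ("shared_themes", overlaps),
   ("opportunities", (PySem.List.slice gaps none (some 5)).map pvMsg)]

-- ===== PORT B =====
-- 'while i < n and mine[i] < t: i += 1' — the still-unscanned suffix of mine stands for index i
def pvAdvance (mine : List String) (t : String) : List String :=
  match mine with
  | [] => []
  | x :: xs => if x < t then pvAdvance xs t else x :: xs

-- 'j += 1; while j < m and market[j] == t: j += 1' — the unscanned suffix stands for index j
def pvSkipEq (xs : List String) (t : String) : List String :=
  match xs with
  | [] => []
  | x :: rest => if x == t then pvSkipEq rest t else x :: rest

-- termination helper for the merge loop (cited by decreasing_by)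
lemma pvSkipEq_length_le (xs : List String) (t : String) : (pvSkipEq xs t).length ≤ xs.length := by
  induction xs with
  | nil => simp [pvSkipEq]
  | cons x rest ih =>
    simp only [pvSkipEq]
    split
    · exact ih.trans (Nat.le_succ _)
    · simp

-- the outer 'while j < m' loop of B, with its two accumulators
def pvMerge (mine market gaps overlaps : List String) : List String × List String :=
  match market with
  | [] => (gaps, overlaps)
  | t :: rest =>
    let mine' := pvAdvance mine t
    if mine'.head? = some t then
      pvMerge mine' (pvSkipEq rest t) gaps (overlaps ++ [t])
    else
      pvMerge mine' (pvSkipEq rest t) (gaps ++ [t]) overlaps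
termination_by market.length
decreasing_by
  · exact Nat.lt_succ_of_le (pvSkipEq_length_le rest t)
  · exact Nat.lt_succ_of_le (pvSkipEq_length_le rest t)

def content_gap_analysis_alt (my_post_analysis : List (String × List (List (String × String)))) (research_results : List (String × List (List (String × String)))) : List (String × List String) :=
  let mine :=
    PySem.List.sorted (((PySem.Dict.mk my_post_analysis).getD "themes" []).map pvTheme) (fun x => x) false
  let market :=
    PySem.List.sorted (((PySem.Dict.mk research_results).getD "themes" []).map pvTheme) (fun x => x) false
  let p := pvMerge mine market [] []
  let gaps := PySem.List.slice p.1 none (some 8)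
  let overlaps := PySem.List.slice p.2 none (some 8)
  [("market_only_themes", gaps),
   ("shared_themes", overlaps),
   ("opportunities", (PySem.List.slice gaps none (some 5)).map pvMsg)]

-- ===== PRECONDITION & SPEC =====
-- Pre_ excludes exactly the inputs where some item in a "themes" list lacks the key
-- "theme": there the Python raises KeyError (both A and B).
def Pre_content_gap_analysis (my_post_analysis : List (String × List (List (String × String)))) (research_results : List (String × List (List (String × String)))) : Prop :=
  (∀ item ∈ (PySem.Dict.mk my_post_analysis).getD "themes" [], (PySem.Dict.mk item).contains "theme" = true) ∧
  (∀ item ∈ (PySem.Dict.mk research_results).getD "themes" [], (PySem.Dict.mk item).contains "theme" = true)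
instance (my_post_analysis : List (String × List (List (String × String)))) (research_results : List (String × List (List (String × String)))) : Decidable (Pre_content_gap_analysis my_post_analysis research_results) := by unfold Pre_content_gap_analysis; infer_instance

def pvWitness_content_gap_analysis : (List (String × List (List (String × String)))) × (List (String × List (List (String × String)))) :=
  ([("themes", [[("theme", "ai")]])],
   [("themes", [[("theme", "ai")], [("theme", "crypto")], [("theme", "biking")]])])

def Spec_content_gap_analysis (my_post_analysis : List (String × List (List (String × String)))) (research_results : List (String × List (List (String × String)))) (out : List (String × List String)) : Prop := out = content_gap_analysis_alt my_post_analysis research_results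
instance (my_post_analysis : List (String × List (List (String × String)))) (research_results : List (String × List (List (String × String)))) (out : List (String × List String)) : Decidable (Spec_content_gap_analysis my_post_analysis research_results out) := by unfold Spec_content_gap_analysis; infer_instance

-- ===== CLAIM (what is proved, stated in full; the proofs are below) =====
def Claim_equal_content_gap_analysis : Prop := ∀ (my_post_analysis : List (String × List (List (String × String)))) (research_results : List (String × List (List (String × String)))), Dom_content_gap_analysis my_post_analysis research_results → Pre_content_gap_analysis my_post_analysis research_results → Spec_content_gap_analysis my_post_analysis research_results (content_gap_analysis my_post_analysis research_results)

-- ===== LEMMAS AND PROOFS =====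

-- the distinct themes of a sorted market list, in the order the merge loop meets them
def pvDedup (market : List String) : List String :=
  match market with
  | [] => []
  | t :: rest => t :: pvDedup (pvSkipEq rest t)
termination_by market.length
decreasing_by exact Nat.lt_succ_of_le (pvSkipEq_length_le rest t)

-- membership facts about the two skip helpers
lemma mem_pvSkipEq {u : String} {xs : List String} {t : String} (h : u ∈ pvSkipEq xs t) : u ∈ xs := by
  induction xs with
  | nil => simp [pvSkipEq] at h
  | cons x rest ih =>
    simp only [pvSkipEq] at h
    split at h
    · exact List.mem_cons_of_mem _ (ih h)
    · exact h

lemma mem_pvSkipEq_or {u : String} {xs : List String} {t : String} (h : u ∈ xs) :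
    u = t ∨ u ∈ pvSkipEq xs t := by
  induction xs with
  | nil => simp at h
  | cons x rest ih =>
    simp only [pvSkipEq]
    rcases List.mem_cons.mp h with rfl | h'
    · split
      · rename_i he; exact Or.inl (by simpa using he)
      · exact Or.inr (List.mem_cons_self)
    · split
      · exact ih h'
      · exact Or.inr (List.mem_cons_of_mem _ h')

lemma mem_pvDedup {u : String} (xs : List String) : u ∈ pvDedup xs ↔ u ∈ xs := by
  induction hn : xs.length using Nat.strong_induction_on generalizing xs with
  | _ n ih =>
    cases xs with
    | nil => simp [pvDedup]
    | cons t rest =>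
      rw [pvDedup]
      constructor
      · intro h
        rcases List.mem_cons.mp h with rfl | h'
        · exact List.mem_cons_self
        · have := (ih (pvSkipEq rest t).length (by subst hn; exact Nat.lt_succ_of_le (pvSkipEq_length_le rest t)) _ rfl).mp h'
          exact List.mem_cons_of_mem _ (mem_pvSkipEq this)
      · intro h
        rcases List.mem_cons.mp h with rfl | h'
        · exact List.mem_cons_self
        · rcases mem_pvSkipEq_or h' with heq | h''
          · rw [heq]; exact List.mem_cons_self
          · exact List.mem_cons_of_mem _
              ((ih (pvSkipEq rest t).length (by subst hn; exact Nat.lt_succ_of_le (pvSkipEq_length_le rest t)) _ rfl).mpr h'')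

-- pvSkipEq of a sorted list keeps sortedness and keeps every element strictly above t
lemma pairwise_pvSkipEq {xs : List String} {t : String} (h : xs.Pairwise (· ≤ ·)) :
    (pvSkipEq xs t).Pairwise (· ≤ ·) := by
  induction xs with
  | nil => simp [pvSkipEq]
  | cons x rest ih =>
    simp only [pvSkipEq]
    split
    · exact ih h.of_cons
    · exact h

lemma pvSkipEq_gt {xs : List String} {t : String} (hs : xs.Pairwise (· ≤ ·))
    (hge : ∀ v ∈ xs, t ≤ v) : ∀ u ∈ pvSkipEq xs t, t < u := by
  induction xs with
  | nil => simp [pvSkipEq]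
  | cons x rest ih =>
    simp only [pvSkipEq]
    split
    · exact ih hs.of_cons (fun v hv => hge v (List.mem_cons_of_mem _ hv))
    · rename_i hne
      intro u hu
      have hx : t < x := lt_of_le_of_ne (hge x List.mem_cons_self) (by simpa using (Ne.symm (by simpa using hne)))
      rcases List.mem_cons.mp hu with rfl | hu'
      · exact hx
      · exact lt_of_lt_of_le hx ((List.pairwise_cons.mp hs).1 u hu')

lemma pvDedup_gt {rest : List String} {t : String} (hs : rest.Pairwise (· ≤ ·))
    (hge : ∀ v ∈ rest, t ≤ v) : ∀ u ∈ pvDedup (pvSkipEq rest t), t < u := by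
  intro u hu
  exact pvSkipEq_gt hs hge u ((mem_pvDedup _).mp hu)

-- pvDedup of a sorted list is strictly increasing
lemma pvDedup_pairwise_lt {xs : List String} (h : xs.Pairwise (· ≤ ·)) :
    (pvDedup xs).Pairwise (· < ·) := by
  induction hn : xs.length using Nat.strong_induction_on generalizing xs with
  | _ n ih =>
    cases xs with
    | nil => simp [pvDedup]
    | cons t rest =>
      rw [pvDedup]
      refine List.pairwise_cons.mpr ⟨?_, ?_⟩
      · exact pvDedup_gt h.of_cons (fun v hv => (List.pairwise_cons.mp h).1 v hv)
      · exact ih (pvSkipEq rest t).length (by subst hn; exact Nat.lt_succ_of_le (pvSkipEq_length_le rest t))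
          (pairwise_pvSkipEq h.of_cons) rfl

-- pvAdvance: suffix facts
lemma mem_pvAdvance {u : String} {mine : List String} {t : String} (ht : t ≤ u) :
    u ∈ pvAdvance mine t ↔ u ∈ mine := by
  induction mine with
  | nil => simp [pvAdvance]
  | cons x xs ih =>
    simp only [pvAdvance]
    split
    · rename_i hx
      rw [ih]
      constructor
      · exact List.mem_cons_of_mem _
      · intro h
        rcases List.mem_cons.mp h with rfl | h'
        · exact absurd (lt_of_lt_of_le hx ht) (lt_irrefl u)
        · exact h'
    · rfl

lemma pairwise_pvAdvance {mine : List String} {t : String} (h : mine.Pairwise (· ≤ ·)) :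
    (pvAdvance mine t).Pairwise (· ≤ ·) := by
  induction mine with
  | nil => simp [pvAdvance]
  | cons x xs ih =>
    simp only [pvAdvance]
    split
    · exact ih h.of_cons
    · exact h

-- the 'if mine[i] == t' test of the merge detects membership in sorted mine
lemma head_pvAdvance {mine : List String} {t : String} (h : mine.Pairwise (· ≤ ·)) :
    ((pvAdvance mine t).head? = some t) ↔ t ∈ mine := by
  induction mine with
  | nil => simp [pvAdvance]
  | cons x xs ih =>
    simp only [pvAdvance]
    split
    · rename_i hx
      rw [ih h.of_cons]
      constructor
      · exact List.mem_cons_of_mem _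
      · intro hm
        rcases List.mem_cons.mp hm with rfl | h'
        · exact absurd hx (lt_irrefl t)
        · exact h'
    · rename_i hx
      simp only [List.head?_cons, Option.some.injEq, List.mem_cons]
      constructor
      · intro he; exact Or.inl he.symm
      · intro hm
        rcases hm with rfl | h'
        · rfl
        · have h1 : x ≤ t := (List.pairwise_cons.mp h).1 t h'
          exact le_antisymm h1 (not_lt.mp hx)

-- the merge loop computes the two membership filters of pvDedup market
lemma pvMerge_eq_filters (mine market g o : List String)
    (hm : mine.Pairwise (· ≤ ·)) (hk : market.Pairwise (· ≤ ·)) :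
    pvMerge mine market g o
      = (g ++ (pvDedup market).filter (fun t => !(decide (t ∈ mine))),
         o ++ (pvDedup market).filter (fun t => decide (t ∈ mine))) := by
  induction hn : market.length using Nat.strong_induction_on generalizing mine market g o with
  | _ n ih =>
    cases market with
    | nil => simp [pvMerge, pvDedup]
    | cons t rest =>
      rw [pvMerge, pvDedup]
      have hlen : (pvSkipEq rest t).length < n := by
        subst hn; exact Nat.lt_succ_of_le (pvSkipEq_length_le rest t)
      have hm' : (pvAdvance mine t).Pairwise (· ≤ ·) := pairwise_pvAdvance hm
      have hk' : (pvSkipEq rest t).Pairwise (· ≤ ·) := pairwise_pvSkipEq hk.of_cons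
      have hgt : ∀ u ∈ pvDedup (pvSkipEq rest t), t < u :=
        pvDedup_gt hk.of_cons (fun v hv => (List.pairwise_cons.mp hk).1 v hv)
      have hfilt1 : (pvDedup (pvSkipEq rest t)).filter (fun u => !(decide (u ∈ pvAdvance mine t)))
          = (pvDedup (pvSkipEq rest t)).filter (fun u => !(decide (u ∈ mine))) := by
        apply List.filter_congr
        intro u hu
        simp [mem_pvAdvance (le_of_lt (hgt u hu))]
      have hfilt2 : (pvDedup (pvSkipEq rest t)).filter (fun u => decide (u ∈ pvAdvance mine t))
          = (pvDedup (pvSkipEq rest t)).filter (fun u => decide (u ∈ mine)) := by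
        apply List.filter_congr
        intro u hu
        simp [mem_pvAdvance (le_of_lt (hgt u hu))]
      by_cases hmem : (pvAdvance mine t).head? = some t
      · have htm : t ∈ mine := (head_pvAdvance hm).mp hmem
        rw [if_pos hmem, ih _ hlen _ _ _ _ hm' hk' rfl, hfilt1, hfilt2]
        simp [htm]
      · have htm : t ∉ mine := fun h => hmem ((head_pvAdvance hm).mpr h)
        rw [if_neg hmem, ih _ hlen _ _ _ _ hm' hk' rfl, hfilt1, hfilt2]
        simp [htm]

-- pvDedup of the sorted raw list IS sorted(set(raw))
lemma pvDedup_sorted_eq (xs : List String) :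
    pvDedup (PySem.List.sorted xs (fun x => x) false)
      = PySem.List.sorted (PySem.Set.ofList xs) (fun x => x) false := by
  refine (PySem.List.sorted_eq_of_perm_of_pairwise_lt _ _ _ ?_ ?_).symm
  · refine (List.perm_ext_iff_of_nodup ?_ ?_).mpr ?_
    · exact (pvDedup_pairwise_lt (PySem.List.sorted_pairwise xs (fun x => x))).imp ne_of_lt
    · exact PySem.Set.nodup_ofList xs
    · intro u
      simp [mem_pvDedup, PySem.List.mem_sorted, PySem.Set.mem_ofList]
  · exact pvDedup_pairwise_lt (PySem.List.sorted_pairwise xs (fun x => x))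

-- A's two set-algebra results are the same two filters (over sorted(set(market)))
lemma sorted_diff_eq_filter (S : PySem.Set String) (xs : List String) :
    PySem.List.sorted (PySem.Set.diff (PySem.Set.ofList xs) S) (fun x => x) false
      = (PySem.List.sorted (PySem.Set.ofList xs) (fun x => x) false).filter (fun t => !(PySem.Set.contains S t)) := by
  apply PySem.List.sorted_eq_of_perm_of_pairwise_lt
  · refine (List.perm_ext_iff_of_nodup ?_ ?_).mpr ?_
    · exact ((PySem.List.sorted_perm _ _ _).nodup_iff.mpr (PySem.Set.nodup_ofList xs)).filter _
    · exact PySem.Set.nodup_diff _ S (PySem.Set.nodup_ofList xs)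
    · intro x
      simp [List.mem_filter, PySem.List.mem_sorted, PySem.Set.mem_ofList,
        PySem.Set.mem_diff]
  · exact (PySem.List.sorted_ofList_pairwise_lt xs).filter _

lemma sorted_inter_eq_filter (S : PySem.Set String) (hS : S.Nodup) (xs : List String) :
    PySem.List.sorted (PySem.Set.inter S (PySem.Set.ofList xs)) (fun x => x) false
      = (PySem.List.sorted (PySem.Set.ofList xs) (fun x => x) false).filter (fun t => PySem.Set.contains S t) := by
  apply PySem.List.sorted_eq_of_perm_of_pairwise_lt
  · refine (List.perm_ext_iff_of_nodup ?_ ?_).mpr ?_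
    · exact ((PySem.List.sorted_perm _ _ _).nodup_iff.mpr (PySem.Set.nodup_ofList xs)).filter _
    · exact PySem.Set.nodup_inter S _ hS
    · intro x
      simp [List.mem_filter, PySem.List.mem_sorted, PySem.Set.mem_ofList,
        PySem.Set.mem_inter]
      tauto
  · exact (PySem.List.sorted_ofList_pairwise_lt xs).filter _

-- Set.contains (set(mine)) t agrees with membership in sorted(mine)
lemma contains_eq_mem_sorted (l : List String) (t : String) :
    PySem.Set.contains (PySem.Set.ofList l) t
      = decide (t ∈ PySem.List.sorted l (fun x => x) false) := by
  by_cases h : t ∈ l <;> simp [PySem.List.mem_sorted, h]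

-- ===== VERDICT (by name: the statement is the Claim_ definition above) =====
theorem content_gap_analysis_spec : Claim_equal_content_gap_analysis := by
  intro mpa rr _dom _pre
  unfold Spec_content_gap_analysis content_gap_analysis content_gap_analysis_alt
  simp only [pvMerge_eq_filters _ _ _ _ (PySem.List.sorted_pairwise _ _) (PySem.List.sorted_pairwise _ _),
    pvDedup_sorted_eq, sorted_diff_eq_filter,
    sorted_inter_eq_filter _ (PySem.Set.nodup_ofList _),
    List.nil_append, contains_eq_mem_sorted]
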